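-- pv_equiv track=rewrite | github.com/lmcai/Orobanchaceae_comparative_mitome | HGT/HGTclassifier.py | find_max_block_around_element
-- ===== SOURCE A (Python) =====
-- def find_max_block_around_element(lst, target_name, element_index, max_diff_count):
--     max_block = []
--     current_block = []
--     diff_count = 0
--     max_start = 0
--     max_end = 0
--     current_start = 0
--     for index, item in enumerate(lst):
--         name, value = item
--         if index == element_index:  # When reaching the specified element index
--             start_index = max(0, index - 1)  # Start searching from one element before
--             end_index = min(len(lst) - 1, index + 1)  # End search at one element after
--             for i in range(start_index, end_index + 1):
--                 current_block.append(lst[i])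
--                 if lst[i][1] != target_name:
--                     diff_count += 1
--                 else:
--                 	diff_count=0#I can have 1 Asteraceae and 1 Zingiberaceae as long as they are not next to each other
--             if diff_count <= max_diff_count and len(current_block) > len(max_block):
--                 max_block = current_block[:]
--                 max_start = start_index
--                 max_end = end_index
--             break
--     return(max_block, max_start, max_end)
-- ===== SOURCE B (Python) =====
-- def find_max_block_around_element(lst, target_name, element_index, max_diff_count):
--     # Direct computation: no scan over the list to locate the index.
--     if not (0 <= element_index < len(lst)):
--         return ([], 0, 0)
--     start = max(0, element_index - 1)
--     end = min(len(lst) - 1, element_index + 1)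
--     block = lst[start:end + 1]
--     diff = 0
--     for _, value in block:
--         diff = diff + 1 if value != target_name else 0
--     if diff <= max_diff_count and len(block) > 0:
--         return (block, start, end)
--     return ([], 0, 0)
-- ===== Notes on version B (the rewrite author's own statement) =====
-- stated objective: simpler
-- what changed: Replaces the enumerate scan that searches for element_index with a direct range guard plus a slice lst[start:end+1], folding the diff counter over the slice's elements instead of indexing back into the list.
import Mathlib
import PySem

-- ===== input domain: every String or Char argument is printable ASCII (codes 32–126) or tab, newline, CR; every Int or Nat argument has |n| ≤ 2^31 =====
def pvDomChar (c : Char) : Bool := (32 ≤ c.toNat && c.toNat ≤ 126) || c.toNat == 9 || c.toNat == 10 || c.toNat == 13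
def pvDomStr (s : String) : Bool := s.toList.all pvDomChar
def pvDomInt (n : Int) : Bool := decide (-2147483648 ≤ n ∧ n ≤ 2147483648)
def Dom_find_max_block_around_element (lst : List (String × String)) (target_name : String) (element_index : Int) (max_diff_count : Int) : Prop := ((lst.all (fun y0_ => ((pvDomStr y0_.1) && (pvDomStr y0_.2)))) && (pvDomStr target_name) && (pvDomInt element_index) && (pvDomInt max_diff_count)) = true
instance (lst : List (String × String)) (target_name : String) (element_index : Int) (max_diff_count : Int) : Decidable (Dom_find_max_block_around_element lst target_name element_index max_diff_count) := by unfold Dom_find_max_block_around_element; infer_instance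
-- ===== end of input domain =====

-- B replaces A's enumerate scan with a direct range guard and a slice; simpler, same values everywhere.


-- ===== PORT A =====
-- the body executed when the enumerate loop reaches element_index (then breaks)
def findA_body (full : List (String × String)) (target_name : String) (ei max_diff_count : Int) : (List (String × String)) × Int × Int :=
  let start_index := max 0 (ei - 1)
  let end_index := min ((full.length : Int) - 1) (ei + 1)
  let st := (PySem.List.pyRange start_index (end_index + 1) 1).foldl
      (fun (s : List (String × String) × Int) i =>
        (s.1 ++ [PySem.List.pyGetD full i ("", "")],
         if (PySem.List.pyGetD full i ("", "")).2 ≠ target_name then s.2 + 1 else 0)) ([], 0)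
  if st.2 ≤ max_diff_count ∧ 0 < st.1.length then (st.1, start_index, end_index) else ([], 0, 0)

-- the enumerate loop: walk the list with its index, break on index == element_index
def findA_go (rem full : List (String × String)) (target_name : String) (ei max_diff_count : Int) (idx : Nat) : (List (String × String)) × Int × Int :=
  match rem with
  | [] => ([], 0, 0)
  | _ :: rest =>
    if (idx : Int) = ei then findA_body full target_name ei max_diff_count
    else findA_go rest full target_name ei max_diff_count (idx + 1)

def find_max_block_around_element (lst : List (String × String)) (target_name : String) (element_index : Int) (max_diff_count : Int) : (List (String × String)) × Int × Int :=
  findA_go lst lst target_name element_index max_diff_count 0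

-- ===== PORT B =====
def find_max_block_around_element_alt (lst : List (String × String)) (target_name : String) (element_index : Int) (max_diff_count : Int) : (List (String × String)) × Int × Int :=
  if 0 ≤ element_index ∧ element_index < (lst.length : Int) then
    let start := max 0 (element_index - 1)
    let stop := min ((lst.length : Int) - 1) (element_index + 1)
    let block := PySem.List.slice lst (some start) (some (stop + 1))
    let diff := block.foldl (fun d x => if x.2 ≠ target_name then d + 1 else 0) (0 : Int)
    if diff ≤ max_diff_count ∧ 0 < block.length then (block, start, stop) else ([], 0, 0)
  else ([], 0, 0)

-- ===== PRECONDITION & SPEC =====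
def Spec_find_max_block_around_element (lst : List (String × String)) (target_name : String) (element_index : Int) (max_diff_count : Int) (out : (List (String × String)) × Int × Int) : Prop := out = find_max_block_around_element_alt lst target_name element_index max_diff_count
instance (lst : List (String × String)) (target_name : String) (element_index : Int) (max_diff_count : Int) (out : (List (String × String)) × Int × Int) : Decidable (Spec_find_max_block_around_element lst target_name element_index max_diff_count out) := by unfold Spec_find_max_block_around_element; infer_instance

-- ===== CLAIM (what is proved, stated in full; the proofs are below) =====
def Claim_equal_find_max_block_around_element : Prop := ∀ (lst : List (String × String)) (target_name : String) (element_index : Int) (max_diff_count : Int), Dom_find_max_block_around_element lst target_name element_index max_diff_count → Spec_find_max_block_around_element lst target_name element_index max_diff_count (find_max_block_around_element lst target_name element_index max_diff_count)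

-- ===== LEMMAS AND PROOFS =====

-- a fold over range(a,b) reading xs[i] is a fold over the slice xs[a:b]  (0 ≤ a ≤ b ≤ len xs)
lemma foldl_pyRange_slice {α β : Type} (xs : List α) (d : α) (f : β → α → β) :
    ∀ (n : Nat) (a b : Int) (init : β), 0 ≤ a → a ≤ b → b ≤ (xs.length : Int) → (b - a).toNat = n →
      (PySem.List.pyRange a b 1).foldl (fun acc j => f acc (PySem.List.pyGetD xs j d)) init
        = (PySem.List.slice xs (some a) (some b)).foldl f init := by
  intro n
  induction n with
  | zero =>
    intro a b init h0 hab hb hn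
    have hba : b = a := by omega
    subst hba
    rw [PySem.List.pyRange_one_eq_nil le_rfl,
        PySem.List.slice_of_nonneg xs h0 h0 (by omega) hb]
    simp
  | succ n ih =>
    intro a b init h0 hab hb hn
    have hlt : a < b := by omega
    have haN : a.toNat < xs.length := by omega
    rw [PySem.List.pyRange_one_cons hlt]
    have hdrop : xs.drop a.toNat = xs[a.toNat] :: xs.drop (a.toNat + 1) :=
      List.drop_eq_getElem_cons haN
    have hslice : PySem.List.slice xs (some a) (some b)
        = xs[a.toNat] :: PySem.List.slice xs (some (a + 1)) (some b) := by
      rw [PySem.List.slice_of_nonneg xs h0 (by omega) (by omega) hb,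
          PySem.List.slice_of_nonneg xs (by omega) (by omega) (by omega) hb, hdrop]
      have h1 : b.toNat - a.toNat = (b.toNat - (a + 1).toNat) + 1 := by omega
      have h2 : (a + 1).toNat = a.toNat + 1 := by omega
      rw [h1, h2, List.take_succ_cons]
    rw [hslice]
    simp only [List.foldl_cons]
    rw [PySem.List.pyGetD_eq_getElem xs d h0 (by omega)]
    exact ih (a + 1) b _ (by omega) (by omega) hb (by omega)

-- a fold carrying (block, diff) splits into the block (the list itself) and the diff fold
lemma foldl_pair (t : String) :
    ∀ (l bl : List (String × String)) (dc : Int),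
      l.foldl (fun (s : List (String × String) × Int) x =>
          (s.1 ++ [x], if x.2 ≠ t then s.2 + 1 else 0)) (bl, dc)
        = (bl ++ l, l.foldl (fun d x => if x.2 ≠ t then d + 1 else 0) dc) := by
  intro l
  induction l with
  | nil => intro bl dc; simp
  | cons x rest ih =>
    intro bl dc
    simp only [List.foldl_cons]
    rw [ih]
    simp

-- when element_index is never hit, the enumerate loop falls through to ([],0,0)
lemma findA_go_miss (t : String) (ei mdc : Int) :
    ∀ (rem full : List (String × String)) (idx : Nat),
      (ei < (idx : Int) ∨ (idx : Int) + rem.length ≤ ei) →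
      findA_go rem full t ei mdc idx = ([], 0, 0) := by
  intro rem
  induction rem with
  | nil => intro full idx _; rfl
  | cons x rest ih =>
    intro full idx h
    simp only [findA_go]
    rw [if_neg (by simp at h ⊢; omega)]
    exact ih full (idx + 1) (by simp at h ⊢; omega)

-- when element_index lies ahead in the remaining list, the loop reaches it and runs the body
lemma findA_go_hit (t : String) (ei mdc : Int) :
    ∀ (rem full : List (String × String)) (idx : Nat),
      (idx : Int) ≤ ei → ei < (idx : Int) + rem.length →
      findA_go rem full t ei mdc idx = findA_body full t ei mdc := by
  intro rem
  induction rem with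
  | nil => intro full idx h1 h2; simp at h2; omega
  | cons x rest ih =>
    intro full idx h1 h2
    simp only [findA_go]
    by_cases h : (idx : Int) = ei
    · rw [if_pos h]
    · rw [if_neg h]
      exact ih full (idx + 1) (by push_cast; omega) (by push_cast at h2 ⊢; simp at h2; omega)

-- ===== VERDICT (by name: the statement is the Claim_ definition above) =====
theorem find_max_block_around_element_spec : Claim_equal_find_max_block_around_element := by
  intro lst t ei mdc _
  unfold Spec_find_max_block_around_element find_max_block_around_element find_max_block_around_element_alt
  by_cases h : 0 ≤ ei ∧ ei < (lst.length : Int)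
  · dsimp only
    rw [if_pos h]
    rw [findA_go_hit t ei mdc lst lst 0 (by exact_mod_cast h.1) (by push_cast; omega)]
    unfold findA_body
    dsimp only
    have h0 : (0 : Int) ≤ max 0 (ei - 1) := le_max_left _ _
    have hab : max 0 (ei - 1) ≤ min ((lst.length : Int) - 1) (ei + 1) + 1 := by omega
    have hb : min ((lst.length : Int) - 1) (ei + 1) + 1 ≤ (lst.length : Int) := by omega
    rw [foldl_pyRange_slice lst ("", "")
        (fun (s : List (String × String) × Int) x =>
          (s.1 ++ [x], if x.2 ≠ t then s.2 + 1 else 0))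
        _ _ _ _ h0 hab hb rfl]
    rw [foldl_pair]
    simp
  · rw [if_neg h]
    apply findA_go_miss
    push_cast
    omega
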